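-- pv_equiv track=rewrite | github.com/sjogleka/General_codes | new_2.py | duplicatesOnSegment_2
-- ===== SOURCE A (Python) =====
-- from collections import Counter,defaultdict
--
-- def duplicatesOnSegment_2(arr):
--     def helper(arr, start, end, count):
--         if end == len(arr):
--             return count
--         elif start > end:
--             return helper(arr, 0, end + 1, count)
--         else:
--             sub = Counter(arr[start:end + 1])
--             flag = True
--             for element in sub.values():
--                 if element < 2:
--                     flag = False
--                     break
--             if flag:
--                 count += 1
--             return helper(arr, start + 1, end, count)
--
--     return helper(arr,0,0,0)
-- ===== SOURCE B (Python) =====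
-- def duplicatesOnSegment_2(arr):
--     n = len(arr)
--     total = 0
--     for start in range(n):
--         cnt = {}
--         singles = 0
--         for end in range(start, n):
--             x = arr[end]
--             c = cnt.get(x, 0) + 1
--             cnt[x] = c
--             if c == 1:
--                 singles += 1
--             elif c == 2:
--                 singles -= 1
--             if singles == 0:
--                 total += 1
--     return total
-- ===== Notes on version B (the rewrite author's own statement) =====
-- stated objective: faster
-- what changed: Replaced the recursive enumeration that rebuilds a Counter for every subarray with two nested loops that grow the window from each start, maintaining the count dict and the number of singleton values incrementally, so each cell is O(1).
import Mathlib
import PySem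

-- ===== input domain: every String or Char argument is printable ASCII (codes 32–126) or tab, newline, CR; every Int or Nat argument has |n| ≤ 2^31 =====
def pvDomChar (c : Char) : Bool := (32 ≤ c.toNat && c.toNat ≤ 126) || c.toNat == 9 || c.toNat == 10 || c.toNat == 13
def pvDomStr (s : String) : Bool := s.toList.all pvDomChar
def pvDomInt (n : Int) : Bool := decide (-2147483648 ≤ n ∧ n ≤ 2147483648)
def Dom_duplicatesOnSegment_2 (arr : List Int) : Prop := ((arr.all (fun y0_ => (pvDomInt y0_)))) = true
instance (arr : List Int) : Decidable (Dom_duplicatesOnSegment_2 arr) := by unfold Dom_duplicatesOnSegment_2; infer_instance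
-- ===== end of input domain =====

-- B replaces A's recursion that rebuilds a Counter for every subarray by nested loops growing
-- the window from each start while maintaining the count dict and a singleton counter incrementally.

-- ===== PORT A =====
-- literal port of A's inner 'helper(arr, start, end, count)' ('end' renamed 'fin')
def pvHelperA (arr : List Int) (start fin : Nat) (count : Int) : Int :=
  if arr.length ≤ fin then count
  else if start > fin then pvHelperA arr 0 (fin + 1) count
  else
    let sub := PySem.List.slice arr (some (start : Int)) (some ((fin : Int) + 1))
    let c := PySem.Dict.counter sub
    let flag := c.values.all (fun element => !(element < 2))
    pvHelperA arr (start + 1) fin (if flag then count + 1 else count)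
termination_by (arr.length - fin, fin + 1 - start)
decreasing_by
  · exact Prod.Lex.left _ _ (by omega)
  · exact Prod.Lex.right _ (by omega)

def duplicatesOnSegment_2 (arr : List Int) : Int :=
  pvHelperA arr 0 0 0

-- ===== PORT B =====
-- one step of B's inner loop body (state = (cnt, singles, total))
def pvStepB (arr : List Int) (st : PySem.Dict Int Int × Int × Int) (fin : Nat) :
    PySem.Dict Int Int × Int × Int :=
  let x := arr.getD fin 0
  let c := st.1.getD x 0 + 1
  let cnt := st.1.insert x c
  let singles := if c = 1 then st.2.1 + 1 else if c = 2 then st.2.1 - 1 else st.2.1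
  let total := if singles = 0 then st.2.2 + 1 else st.2.2
  (cnt, singles, total)

def duplicatesOnSegment_2_alt (arr : List Int) : Int :=
  let n := arr.length
  (List.range n).foldl
    (fun total start =>
      ((List.range' start (n - start)).foldl (pvStepB arr)
        (PySem.Dict.empty, 0, total)).2.2)
    0

-- ===== PRECONDITION & SPEC =====
def Spec_duplicatesOnSegment_2 (arr : List Int) (out : Int) : Prop := out = duplicatesOnSegment_2_alt arr
instance (arr : List Int) (out : Int) : Decidable (Spec_duplicatesOnSegment_2 arr out) := by unfold Spec_duplicatesOnSegment_2; infer_instance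

-- ===== CLAIM (what is proved, stated in full; the proofs are below) =====
def Claim_equal_duplicatesOnSegment_2 : Prop := ∀ (arr : List Int), Dom_duplicatesOnSegment_2 arr → Spec_duplicatesOnSegment_2 arr (duplicatesOnSegment_2 arr)

-- ===== LEMMAS AND PROOFS =====

def pvSeg (arr : List Int) (s e : Nat) : List Int := (arr.drop s).take (e - s)

def pvOnes (w : List Int) : Int :=
  (((PySem.Set.ofList w).filter (fun x => w.count x == 1)).length : Int)

theorem pvSeg_snoc (arr : List Int) (s e : Nat) (hse : s ≤ e) (hen : e < arr.length) :
    pvSeg arr s e ++ [arr.getD e 0] = pvSeg arr s (e + 1) := by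
  unfold pvSeg
  have hk : e - s < (arr.drop s).length := by simp; omega
  have h1 : arr.getD e 0 = (arr.drop s)[e - s] := by
    rw [List.getElem_drop]
    rw [List.getD_eq_getElem arr 0 (by omega)]
    congr 1; omega
  have h2 : e + 1 - s = (e - s) + 1 := by omega
  rw [h1, h2, List.take_succ, List.getElem?_eq_getElem hk]
  rfl

theorem pvFilterLen {l : List Int} (hn : l.Nodup) (p q : Int → Bool) (x : Int) (hx : x ∈ l)
    (h : ∀ y ∈ l, y ≠ x → p y = q y) :
    ((l.filter p).length : Int) + (if q x then 1 else 0)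
      = ((l.filter q).length : Int) + (if p x then 1 else 0) := by
  induction l with
  | nil => cases hx
  | cons a t ih =>
    rcases List.mem_cons.mp hx with rfl | hxt
    · have hxt : x ∉ t := (List.nodup_cons.mp hn).1
      have : t.filter p = t.filter q := by
        apply List.filter_congr
        intro y hy; exact h y (List.mem_cons_of_mem _ hy) (fun hxy => hxt (hxy ▸ hy))
      simp only [List.filter_cons, this]
      by_cases hp : p x <;> by_cases hq : q x <;> simp [hp, hq] <;> ring
    · have hax : a ≠ x := fun hax => (List.nodup_cons.mp hn).1 (hax ▸ hxt)
      have hpa : p a = q a := h a List.mem_cons_self hax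
      have := ih (List.nodup_cons.mp hn).2 hxt (fun y hy => h y (List.mem_cons_of_mem _ hy))
      simp only [List.filter_cons, hpa]
      by_cases hq : q a <;> simp [hq] <;> omega

theorem pvOnes_append (w : List Int) (x : Int) :
    pvOnes (w ++ [x]) =
      if w.count x + 1 = 1 then pvOnes w + 1
      else if w.count x + 1 = 2 then pvOnes w - 1 else pvOnes w := by
  unfold pvOnes
  have hc : ∀ y : Int, (w ++ [x]).count y = w.count y + (if y = x then 1 else 0) := by
    intro y; by_cases hyx : y = x
    · subst hyx; simp [List.count_append]
    · have h0 : List.count y [x] = 0 := by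
        rw [List.count_eq_zero]; simp [fun h : y = x => hyx h]
      simp [List.count_append, h0, hyx]
  have hset : PySem.Set.ofList (w ++ [x]) = PySem.Set.add (PySem.Set.ofList w) x :=
    PySem.Set.ofList_append_singleton w x
  by_cases hxw : x ∈ w
  · -- set unchanged; predicate may flip only at x
    have hadd : PySem.Set.add (PySem.Set.ofList w) x = PySem.Set.ofList w :=
      PySem.Set.add_of_mem ((PySem.Set.mem_ofList w x).mpr hxw)
    rw [hset, hadd]
    have hcx : 1 ≤ w.count x := List.count_pos_iff.mpr hxw
    have key := pvFilterLen (PySem.Set.nodup_ofList w)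
      (fun y => (w ++ [x]).count y == 1) (fun y => w.count y == 1) x
      ((PySem.Set.mem_ofList w x).mpr hxw)
      (by intro y _ hyx; simp [hc y, hyx])
    by_cases h1 : w.count x = 1
    · simp only [hc, if_pos rfl, h1] at key ⊢
      simp at key ⊢; omega
    · simp only [hc, if_pos rfl] at key ⊢
      have h2 : ¬ (w.count x + 1 = 1) := by omega
      have h3 : ¬ (w.count x + 1 = 2) := by omega
      simp [h1, h2, h3] at key ⊢; omega
  · -- x is a new element with count 1
    have hadd : PySem.Set.add (PySem.Set.ofList w) x = PySem.Set.ofList w ++ [x] :=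
      PySem.Set.add_of_not_mem (fun hm => hxw ((PySem.Set.mem_ofList w x).mp hm))
    have hcx : w.count x = 0 := List.count_eq_zero.mpr hxw
    rw [hset, hadd, List.filter_append]
    have hone : (w ++ [x]).count x = 1 := by rw [hc]; simp [hcx]
    have hfilt : (PySem.Set.ofList w).filter (fun y => (w ++ [x]).count y == 1)
        = (PySem.Set.ofList w).filter (fun y => w.count y == 1) := by
      apply List.filter_congr
      intro y hy
      have hyx : y ≠ x := fun hyx => hxw (hyx ▸ ((PySem.Set.mem_ofList w y).mp hy))
      simp [hc y, hyx]
    rw [hfilt]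
    simp [hcx]

theorem pvOnes_zero_iff (w : List Int) :
    pvOnes w = 0 ↔ ∀ x ∈ w, 2 ≤ w.count x := by
  unfold pvOnes
  rw [Int.natCast_eq_zero, List.length_eq_zero_iff, List.filter_eq_nil_iff]
  constructor
  · intro h x hx
    have := h x ((PySem.Set.mem_ofList w x).mpr hx)
    have hp : 1 ≤ w.count x := List.count_pos_iff.mpr hx
    simp at this; omega
  · intro h x hx
    have := h x ((PySem.Set.mem_ofList w x).mp hx)
    simp; omega

theorem pvFlag_eq (w : List Int) :
    ((PySem.Dict.counter w).values.all (fun element : Int => !(element < 2)))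
      = decide (pvOnes w = 0) := by
  rw [Bool.eq_iff_iff]
  simp only [decide_eq_true_eq, pvOnes_zero_iff]
  have hv : (PySem.Dict.counter w).values
      = (PySem.Set.ofList w).map (fun k => ((w.count k : Nat) : Int)) := by
    show ((PySem.Dict.counter w).items).map (·.2) = _
    rw [PySem.Dict.items_counter]
    simp [List.map_map, Function.comp]
  rw [hv]
  simp only [List.all_map, List.all_eq_true, Function.comp]
  constructor
  · intro h x hx
    have := h x ((PySem.Set.mem_ofList w x).mpr hx)
    simp at this; omega
  · intro h x hx
    have := h x ((PySem.Set.mem_ofList w x).mp hx)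
    simp; omega

theorem pvCounter_snoc (w : List Int) (x : Int) :
    (PySem.Dict.counter w).insert x ((PySem.Dict.counter w).getD x 0 + 1)
      = PySem.Dict.counter (w ++ [x]) := by
  rw [← PySem.Dict.foldl_insert_getD_add_one_eq_counter, ← PySem.Dict.foldl_insert_getD_add_one_eq_counter]
  rw [List.foldl_append]
  rfl

def pvPay (arr : List Int) : List Nat → List Int → Int
  | [], _ => 0
  | j :: l, w =>
      (if pvOnes (w ++ [arr.getD j 0]) = 0 then (1 : Int) else 0) + pvPay arr l (w ++ [arr.getD j 0])

theorem pvInner (arr : List Int) :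
    ∀ (l : List Nat) (w : List Int) (t : Int),
      l.foldl (pvStepB arr) (PySem.Dict.counter w, pvOnes w, t)
        = (PySem.Dict.counter (w ++ l.map (fun j => arr.getD j 0)),
           pvOnes (w ++ l.map (fun j => arr.getD j 0)),
           t + pvPay arr l w) := by
  intro l
  induction l with
  | nil => intro w t; simp [pvPay]
  | cons j l ih =>
    intro w t
    rw [List.foldl_cons]
    have hstep : pvStepB arr (PySem.Dict.counter w, pvOnes w, t) j
        = (PySem.Dict.counter (w ++ [arr.getD j 0]), pvOnes (w ++ [arr.getD j 0]),
           if pvOnes (w ++ [arr.getD j 0]) = 0 then t + 1 else t) := by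
      unfold pvStepB
      simp only [PySem.Dict.getD_counter]
      set x := arr.getD j 0 with hx
      have h1 : (PySem.Dict.counter w).insert x ((w.count x : Int) + 1)
          = PySem.Dict.counter (w ++ [x]) := by
        have := pvCounter_snoc w x
        rwa [PySem.Dict.getD_counter] at this
      have h2 : (if ((w.count x : Int) + 1 = 1) then pvOnes w + 1
            else if ((w.count x : Int) + 1 = 2) then pvOnes w - 1 else pvOnes w)
          = pvOnes (w ++ [x]) := by
        rw [pvOnes_append]
        split_ifs <;> omega
      simp only [h1, h2]
    rw [hstep, ih]
    have hassoc : w ++ [arr.getD j 0] ++ l.map (fun j => arr.getD j 0)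
        = w ++ (j :: l).map (fun j => arr.getD j 0) := by simp
    rw [hassoc]
    simp only [pvPay, Prod.mk.injEq, true_and]
    split_ifs <;> ring

def pvGood (arr : List Int) (s e : Nat) : Int :=
  if pvOnes (pvSeg arr s (e + 1)) = 0 then 1 else 0

def pvCol (arr : List Int) (s : Nat) : Int :=
  ((List.range' s (arr.length - s)).map (fun e => pvGood arr s e)).sum

def pvRow (arr : List Int) (s e : Nat) : Int :=
  ((List.range' s (e + 1 - s)).map (fun s' => pvGood arr s' e)).sum

def pvRest (arr : List Int) (e : Nat) : Int :=
  ((List.range' e (arr.length - e)).map (fun e' => pvRow arr 0 e')).sum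

theorem pvPay_range (arr : List Int) :
    ∀ (k e s : Nat), s ≤ e → e + k ≤ arr.length →
      pvPay arr (List.range' e k) (pvSeg arr s e)
        = ((List.range' e k).map (fun j => pvGood arr s j)).sum := by
  intro k
  induction k with
  | zero => intro e s _ _; simp [pvPay]
  | succ k ih =>
    intro e s hse hek
    rw [List.range'_succ]
    simp only [pvPay, List.map_cons, List.sum_cons]
    rw [pvSeg_snoc arr s e hse (by omega)]
    rw [ih (e + 1) s (by omega) (by omega)]
    rfl

theorem pvSlice_eq (arr : List Int) (s e : Nat) :
    PySem.List.slice arr (some (s : Int)) (some ((e : Int) + 1)) = pvSeg arr s (e + 1) := by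
  have h1 : ((e : Int) + 1) = ((e + 1 : Nat) : Int) := by push_cast; ring
  rw [h1]
  simp only [Nat.cast_nonneg, PySem.List.slice_toNat, Int.toNat_natCast]
  rfl

theorem pvHelperA_eq (arr : List Int) :
    ∀ (start fin : Nat) (count : Int), fin < arr.length → start ≤ fin + 1 →
      pvHelperA arr start fin count = count + pvRow arr start fin + pvRest arr (fin + 1) := by
  intro start fin count
  induction start, fin, count using pvHelperA.induct arr with
  | case1 start fin count hlen =>
    intro h _; omega
  | case2 start fin count hlen hgt ih =>
    intro hfin hst
    have hse : start = fin + 1 := by omega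
    rw [pvHelperA]
    simp only [if_neg (by omega : ¬ arr.length ≤ fin), if_pos hgt]
    have hrow0 : pvRow arr start fin = 0 := by
      unfold pvRow; rw [hse]; simp
    by_cases hn : fin + 1 < arr.length
    · rw [ih hn (by omega)]
      have : pvRest arr (fin + 1) = pvRow arr 0 (fin + 1) + pvRest arr (fin + 2) := by
        unfold pvRest
        have h2 : arr.length - (fin + 1) = (arr.length - (fin + 2)) + 1 := by omega
        rw [h2, List.range'_succ]
        simp
      rw [this, hrow0]; ring
    · have hfe : fin + 1 = arr.length := by omega
      rw [pvHelperA]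
      simp only [if_pos (by omega : arr.length ≤ fin + 1)]
      have : pvRest arr (fin + 1) = 0 := by
        unfold pvRest; rw [hfe]; simp
      rw [this, hrow0]; ring
  | case3 start fin count hlen hgt sub c flag ih =>
    intro hfin hst
    have hse : start ≤ fin := by omega
    rw [pvHelperA]
    simp only [if_neg (by omega : ¬ arr.length ≤ fin), if_neg hgt]
    simp only [sub, c, flag, dite_eq_ite] at ih
    rw [ih hfin (by omega)]
    simp only [pvSlice_eq, pvFlag_eq]
    have hrow : pvRow arr start fin = pvGood arr start fin + pvRow arr (start + 1) fin := by
      unfold pvRow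
      have h2 : fin + 1 - start = (fin - start) + 1 := by omega
      have h3 : fin + 1 - (start + 1) = fin - start := by omega
      rw [h2, List.range'_succ, h3]
      simp
    rw [hrow]
    unfold pvGood
    by_cases h0 : pvOnes (pvSeg arr start (fin + 1)) = 0 <;> simp [h0] <;> ring

theorem pvA_eq (arr : List Int) : pvHelperA arr 0 0 0 = pvRest arr 0 := by
  by_cases hn : 0 < arr.length
  · rw [pvHelperA_eq arr 0 0 0 hn (by omega)]
    unfold pvRest pvRow
    have h2 : arr.length - 0 = (arr.length - 1) + 1 := by omega
    rw [h2, List.range'_succ]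
    simp
    rw [List.range'_succ]
    simp
  · have h0 : arr.length = 0 := by omega
    rw [pvHelperA]
    simp [h0, pvRest]

theorem pvListSum (k s : Nat) (f : Nat → Int) :
    ((List.range' s k).map f).sum = ∑ i ∈ Finset.range k, f (s + i) := by
  rw [List.range'_eq_map_range, List.map_map]
  rfl

theorem pvSwap (arr : List Int) :
    pvRest arr 0 = ((List.range arr.length).map (fun s => pvCol arr s)).sum := by
  unfold pvRest pvCol pvRow
  set n := arr.length with hn
  have hR : ((List.range n).map
        (fun s => ((List.range' s (n - s)).map (fun e => pvGood arr s e)).sum)).sum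
      = ∑ s ∈ Finset.range n, ∑ e ∈ Finset.Ico s n, pvGood arr s e := by
    have h1 : ∀ s, ((List.range' s (n - s)).map (fun e => pvGood arr s e)).sum
        = ∑ e ∈ Finset.Ico s n, pvGood arr s e := by
      intro s
      rw [pvListSum, Finset.sum_Ico_eq_sum_range]
    rw [List.map_congr_left (fun s _ => h1 s)]
    rw [show (List.range n) = List.range' 0 n from List.range_eq_range']
    rw [pvListSum]
    simp
  rw [hR]
  have hLs : ((List.range' 0 (n - 0)).map
        (fun e' => ((List.range' 0 (e' + 1 - 0)).map (fun s' => pvGood arr s' e')).sum)).sum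
      = ∑ e ∈ Finset.range n, ∑ s ∈ Finset.range (e + 1), pvGood arr s e := by
    rw [Nat.sub_zero, pvListSum]
    apply Finset.sum_congr rfl
    intro e _
    rw [Nat.zero_add, Nat.sub_zero, pvListSum]
    apply Finset.sum_congr rfl
    intro s _
    rw [Nat.zero_add]
  rw [hLs]
  calc ∑ e ∈ Finset.range n, ∑ s ∈ Finset.range (e + 1), pvGood arr s e
      = ∑ e ∈ Finset.range n, ∑ s ∈ Finset.range n, if s ≤ e then pvGood arr s e else 0 := by
        apply Finset.sum_congr rfl; intro e he
        have hf : Finset.range (e + 1) = (Finset.range n).filter (fun s => s ≤ e) := by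
          ext s; simp at he ⊢; omega
        rw [hf, Finset.sum_filter]
    _ = ∑ s ∈ Finset.range n, ∑ e ∈ Finset.range n, if s ≤ e then pvGood arr s e else 0 := by
        rw [Finset.sum_comm]
    _ = ∑ s ∈ Finset.range n, ∑ e ∈ Finset.Ico s n, pvGood arr s e := by
        apply Finset.sum_congr rfl; intro s _
        rw [← Finset.sum_filter]
        congr 1
        ext e; simp [Finset.mem_Ico]; tauto

theorem pvB_eq (arr : List Int) :
    duplicatesOnSegment_2_alt arr = ((List.range arr.length).map (fun s => pvCol arr s)).sum := by
  show (List.range arr.length).foldl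
      (fun total start =>
        ((List.range' start (arr.length - start)).foldl (pvStepB arr)
          (PySem.Dict.empty, 0, total)).2.2) 0
    = _
  have hstep : ∀ (t : Int) (s : Nat), s ∈ List.range arr.length →
      ((List.range' s (arr.length - s)).foldl (pvStepB arr)
        (PySem.Dict.empty, 0, t)).2.2 = t + pvCol arr s := by
    intro t s hs
    have h0 : (PySem.Dict.empty, (0:Int), t)
        = (PySem.Dict.counter ([]:List Int), pvOnes [], t) := by rfl
    rw [h0, pvInner]
    show t + pvPay arr (List.range' s (arr.length - s)) [] = t + pvCol arr s
    have hseg : pvSeg arr s s = [] := by simp [pvSeg]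
    rw [← hseg, pvPay_range arr (arr.length - s) s s (le_refl s)
      (by simp at hs; omega)]
    rfl
  rw [PySem.List.foldl_congr_mem (List.range arr.length) _
        (fun t s => t + pvCol arr s) 0 hstep]
  rw [PySem.List.foldl_add]
  simp

-- ===== VERDICT (by name: the statement is the Claim_ definition above) =====
theorem duplicatesOnSegment_2_spec : Claim_equal_duplicatesOnSegment_2 := by
  intro arr _
  unfold Spec_duplicatesOnSegment_2 duplicatesOnSegment_2
  rw [pvA_eq, pvSwap]
  exact (pvB_eq arr).symm
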